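-- pv_equiv track=rewrite | github.com/ti-mo/lanparty-packages | recipes/kernel-ck/migrate-config.py | render_changes
-- ===== SOURCE A (Python) =====
-- def render_changes(config, changes):
--     out = ""
--
--     for i, line in enumerate(config.splitlines(), 1):
--         if i in changes:
--             out += '{}\n'.format(str(changes[i]))
--         else:
--             out += '{}\n'.format(line)
--
--     return out
-- ===== SOURCE B (Python) =====
-- def render_changes(config, changes):
--     lines = config.splitlines()
--     for i, v in changes.items():
--         if 1 <= i <= len(lines):
--             lines[i - 1] = str(v)
--     return ''.join('{}\n'.format(x) for x in lines)
-- ===== Notes on version B (the rewrite author's own statement) =====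
-- stated objective: alternative
-- what changed: B splits the config into a list once, patches the changed line slots in place by looping over the dict items, and joins the list at the end, instead of A's per-line dict membership test plus incremental string concatenation; Pre_ excludes association lists with duplicate keys, which cannot arise from a Python dict and on which A's first-match lookup and B's last-write patching are both accidental.
import Mathlib
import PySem

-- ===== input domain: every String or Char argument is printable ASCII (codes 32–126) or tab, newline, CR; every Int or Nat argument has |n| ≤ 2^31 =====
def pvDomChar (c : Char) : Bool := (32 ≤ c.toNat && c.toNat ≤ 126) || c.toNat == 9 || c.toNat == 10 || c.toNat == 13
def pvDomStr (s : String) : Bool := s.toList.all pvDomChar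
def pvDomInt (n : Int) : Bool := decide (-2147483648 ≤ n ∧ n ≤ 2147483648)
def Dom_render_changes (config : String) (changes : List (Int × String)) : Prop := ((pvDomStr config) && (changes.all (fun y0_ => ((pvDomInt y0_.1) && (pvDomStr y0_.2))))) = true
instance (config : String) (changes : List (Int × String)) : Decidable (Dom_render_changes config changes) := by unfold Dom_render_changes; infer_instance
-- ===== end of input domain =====

-- B splits the config into a list once, patches changed line slots by looping over the dict
-- items, and joins at the end, instead of A's per-line lookup with incremental concatenation
-- (alternative decomposition; return value only — neither side mutates its arguments).


-- ===== PORT A =====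
-- for i, line in enumerate(config.splitlines(), 1): out += changes[i] if i in changes else line, each with '\n'
def render_changes (config : String) (changes : List (Int × String)) : String :=
  (PySem.List.enumerate (PySem.Str.splitlines config) 1).foldl
    (fun out p =>
      match changes.lookup p.1 with
      | some v => out ++ v ++ "\n"
      | none   => out ++ p.2 ++ "\n") ""

-- ===== PORT B =====
-- lines = config.splitlines(); for i, v in changes.items(): if 1 <= i <= len(lines): lines[i-1] = v;
-- return ''.join('{}\n'.format(x) for x in lines)
def render_changes_alt (config : String) (changes : List (Int × String)) : String :=
  let lines := PySem.Str.splitlines config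
  let patched := changes.foldl
    (fun ls p =>
      if 1 ≤ p.1 ∧ p.1 ≤ (ls.length : Int) then ls.set (p.1 - 1).toNat p.2 else ls)
    lines
  PySem.Str.join "" (patched.map (fun x => x ++ "\n"))

-- ===== PRECONDITION & SPEC =====
-- Pre_ excludes association lists with duplicate keys, which cannot arise from a Python dict
-- (the argument is a dict) and on which A's first-match lookup and B's last-write patching
-- are both accidental.
def Pre_render_changes (config : String) (changes : List (Int × String)) : Prop :=
  (changes.map Prod.fst).Nodup

instance (config : String) (changes : List (Int × String)) : Decidable (Pre_render_changes config changes) := by unfold Pre_render_changes; infer_instance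

def pvWitness_render_changes : String × (List (Int × String)) := ("a\nb\nc", [(2, "B"), (5, "E")])

def Spec_render_changes (config : String) (changes : List (Int × String)) (out : String) : Prop := out = render_changes_alt config changes
instance (config : String) (changes : List (Int × String)) (out : String) : Decidable (Spec_render_changes config changes out) := by unfold Spec_render_changes; infer_instance

-- ===== CLAIM (what is proved, stated in full; the proofs are below) =====
def Claim_equal_render_changes : Prop := ∀ (config : String) (changes : List (Int × String)), Dom_render_changes config changes → Pre_render_changes config changes → Spec_render_changes config changes (render_changes config changes)

-- ===== LEMMAS AND PROOFS =====

-- a missing key looks up to none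
theorem lookup_eq_none_of_not_mem (l : List (Int × String)) (k : Int)
    (h : k ∉ l.map Prod.fst) : l.lookup k = none := by
  induction l with
  | nil => rfl
  | cons p rest ih =>
    simp only [List.map_cons, List.mem_cons, not_or] at h
    simp [List.lookup, beq_eq_false_iff_ne.mpr h.1, ih h.2]

-- B's patching loop preserves the length of the line list
theorem patched_length (changes : List (Int × String)) (lines : List String) :
    (changes.foldl
      (fun ls p =>
        if 1 ≤ p.1 ∧ p.1 ≤ (ls.length : Int) then ls.set (p.1 - 1).toNat p.2 else ls)
      lines).length = lines.length := by
  induction changes generalizing lines with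
  | nil => rfl
  | cons p rest ih =>
    simp only [List.foldl_cons]
    split_ifs with h
    · rw [ih, List.length_set]
    · exact ih lines

-- under unique keys, slot j of the patched list is A's first-match lookup at line number j+1
theorem patched_getElem (changes : List (Int × String)) (lines : List String)
    (hnd : (changes.map Prod.fst).Nodup) (j : Nat) (hj : j < lines.length) :
    (changes.foldl
      (fun ls p =>
        if 1 ≤ p.1 ∧ p.1 ≤ (ls.length : Int) then ls.set (p.1 - 1).toNat p.2 else ls)
      lines)[j]'(by rw [patched_length]; exact hj)
    = (changes.lookup ((j : Int) + 1)).getD (lines[j]'hj) := by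
  induction changes generalizing lines with
  | nil => rfl
  | cons p rest ih =>
    obtain ⟨k, v⟩ := p
    simp only [List.map_cons, List.nodup_cons] at hnd
    simp only [List.foldl_cons, List.lookup]
    have hlen : (if 1 ≤ k ∧ k ≤ (lines.length : Int)
        then lines.set (k - 1).toNat v else lines).length = lines.length := by
      split_ifs <;> simp
    rw [ih _ hnd.2 (by rw [hlen]; exact hj)]
    by_cases hk : k = (j : Int) + 1
    · subst hk
      have hrest : rest.lookup ((j : Int) + 1) = none :=
        lookup_eq_none_of_not_mem rest _ hnd.1
      have hcond : 1 ≤ (j : Int) + 1 ∧ (j : Int) + 1 ≤ (lines.length : Int) := by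
        constructor <;> omega
      have hidx : (((j : Int) + 1) - 1).toNat = j := by omega
      rw [hrest]
      simp [hcond, List.getElem_set_self]
    · have hbeq : ((j : Int) + 1 == k) = false := beq_eq_false_iff_ne.mpr (fun h => hk h.symm)
      simp only [hbeq]
      congr 1
      split_ifs with h
      · have hne : (k - 1).toNat ≠ j := by omega
        exact List.getElem_set_ne hne _
      · rfl

-- ''.join over a cons peels off the head
theorem join_empty_cons (a : List Char) (parts : List (List Char)) :
    PySem.Chars.join [] (a :: parts) = a ++ PySem.Chars.join [] parts := by
  cases parts with
  | nil => simp [PySem.Chars.join, List.intercalate]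
  | cons b t => simp [PySem.Chars.join, List.intercalate]

-- A's accumulating loop is the accumulator followed by the concatenation of the per-line pieces
theorem foldl_append_join {α : Type} (f : α → String) (l : List α) (acc : String) :
    l.foldl (fun out x => out ++ f x) acc = acc ++ PySem.Str.join "" (l.map f) := by
  induction l generalizing acc with
  | nil =>
    apply String.toList_inj.mp
    simp [PySem.Str.join, PySem.Chars.join, List.intercalate]
  | cons x rest ih =>
    simp only [List.foldl_cons, List.map_cons, ih]
    apply String.toList_inj.mp
    simp [PySem.Str.toList_join, join_empty_cons]

theorem render_changes_alt_eq (config : String) (changes : List (Int × String)) :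
    render_changes_alt config changes
    = PySem.Str.join ""
        ((changes.foldl
          (fun ls p =>
            if 1 ≤ p.1 ∧ p.1 ≤ (ls.length : Int) then ls.set (p.1 - 1).toNat p.2 else ls)
          (PySem.Str.splitlines config)).map (fun x => x ++ "\n")) := rfl

theorem render_changes_eq (config : String) (changes : List (Int × String))
    (hnd : (changes.map Prod.fst).Nodup) :
    render_changes config changes = render_changes_alt config changes := by
  rw [render_changes_alt_eq]
  unfold render_changes
  have hstep : ∀ (out : String) (p : Int × String), p ∈ PySem.List.enumerate (PySem.Str.splitlines config) 1 →
      (match changes.lookup p.1 with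
       | some v => out ++ v ++ "\n"
       | none   => out ++ p.2 ++ "\n")
      = out ++ ((changes.lookup p.1).getD p.2 ++ "\n") := by
    intro out p _
    cases changes.lookup p.1 <;> simp [String.append_assoc]
  rw [PySem.List.foldl_congr_mem (PySem.List.enumerate (PySem.Str.splitlines config) 1)
    (fun out p =>
      match changes.lookup p.1 with
      | some v => out ++ v ++ "\n"
      | none   => out ++ p.2 ++ "\n")
    (fun out p => out ++ ((changes.lookup p.1).getD p.2 ++ "\n")) "" hstep]
  rw [foldl_append_join (fun p : Int × String => (changes.lookup p.1).getD p.2 ++ "\n")]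
  have hmap : (PySem.List.enumerate (PySem.Str.splitlines config) 1).map
        (fun p => (changes.lookup p.1).getD p.2 ++ "\n")
      = ((changes.foldl
          (fun ls p =>
            if 1 ≤ p.1 ∧ p.1 ≤ (ls.length : Int) then ls.set (p.1 - 1).toNat p.2 else ls)
          (PySem.Str.splitlines config)).map (fun x => x ++ "\n")) := by
    apply List.ext_getElem
    · simp only [List.length_map]
      rw [patched_length]
      simp [PySem.List.length_enumerate]
    · intro j h1 h2
      have hj : j < (PySem.Str.splitlines config).length := by
        simpa [PySem.List.length_enumerate] using h1
      simp only [List.getElem_map]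
      rw [PySem.List.getElem_enumerate,
        patched_getElem changes (PySem.Str.splitlines config) hnd j hj]
      congr 2
      rw [add_comm (1 : Int) (j : Int)]
  rw [hmap]
  rfl

-- ===== VERDICT (by name: the statement is the Claim_ definition above) =====
theorem render_changes_spec : Claim_equal_render_changes := by
  intro config changes _ hpre
  unfold Spec_render_changes
  exact render_changes_eq config changes hpre
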